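-- pv_equiv track=rewrite | github.com/alphal00p/alphaLoopMisc | CutsAndCylinders_generator.py | winding_cycle_finder
-- ===== SOURCE A (Python) =====
-- def cycle_merger(cycle1,cycle2):
--
--     return cycle1.union(cycle2).difference(cycle1.intersection(cycle2))
--
-- def powerset(s):
--     x = len(s)
--     powa=[]
--     for i in range(1 << x):
--         powa.append([s[j] for j in range(x) if (i & (1 << j))])
--     return powa
--
-- def winding_cycle_finder(vset,eset,cycle_set,w_cycle):
--
--     zero_w_cycle=[]
--     one_w_cycle=[]
--     tot_one_w_cycle=[]
--
--     for i in range(0,len(cycle_set)):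
--         if w_cycle[i]==0:
--             zero_w_cycle.append(cycle_set[i])
--         else:
--             one_w_cycle.append(cycle_set[i])
--
--     powa_zero_w_cycle=powerset(zero_w_cycle)
--
--     for cycle in one_w_cycle:
--
--         for cycle_set_p in powa_zero_w_cycle:
--
--             f_cycle=cycle
--             for cycle2 in cycle_set_p:
--                 f_cycle=cycle_merger(f_cycle,cycle2)
--
--             tot_one_w_cycle.append(f_cycle)
--
--
--     return tot_one_w_cycle
-- ===== SOURCE B (Python) =====
-- def winding_cycle_finder(vset, eset, cycle_set, w_cycle):
--     pairs = list(zip(cycle_set, w_cycle))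
--     zero = [c for c, wv in pairs if wv == 0]
--     ones = [c for c, wv in pairs if wv != 0]
--     out = []
--     for c in ones:
--         res = [c]
--         for zc in zero:
--             res = res + [f ^ zc for f in res]
--         out = out + res
--     return out
-- ===== Notes on version B (the rewrite author's own statement) =====
-- stated objective: simpler
-- what changed: B drops A's explicit powerset materialisation and per-subset re-merge (up to |zero| merges per subset) in favour of a doubling fold res = res + [f ^ z for f in res] over the zero-weight cycles, one symmetric-difference per subset, and partitions the cycles via zip instead of an index loop.
import Mathlib
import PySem

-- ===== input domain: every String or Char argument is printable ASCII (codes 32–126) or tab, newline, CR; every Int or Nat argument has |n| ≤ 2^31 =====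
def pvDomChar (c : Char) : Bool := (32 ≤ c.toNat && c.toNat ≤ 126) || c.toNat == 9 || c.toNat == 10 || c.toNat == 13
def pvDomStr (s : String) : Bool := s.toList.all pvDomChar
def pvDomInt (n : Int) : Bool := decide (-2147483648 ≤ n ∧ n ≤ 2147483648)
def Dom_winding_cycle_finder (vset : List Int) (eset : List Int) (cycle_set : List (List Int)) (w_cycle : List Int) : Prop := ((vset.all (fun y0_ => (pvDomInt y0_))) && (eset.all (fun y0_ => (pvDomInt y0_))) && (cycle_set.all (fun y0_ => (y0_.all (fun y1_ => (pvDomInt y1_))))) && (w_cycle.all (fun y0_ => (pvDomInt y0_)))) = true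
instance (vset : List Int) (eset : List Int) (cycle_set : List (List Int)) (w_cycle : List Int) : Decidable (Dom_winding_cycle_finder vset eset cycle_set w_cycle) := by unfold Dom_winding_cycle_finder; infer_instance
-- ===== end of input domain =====

-- B replaces A's powerset materialisation + per-subset re-merge by a doubling fold (res := res ++ [f ^ z for f in res]),
-- one symmetric-difference merge per subset instead of up to |zero| merges; shorter and plainer. Return-value equivalence only.

-- ===== PORT A =====
-- cycle1.union(cycle2).difference(cycle1.intersection(cycle2)) on Python sets
def pvMerger (cycle1 cycle2 : List Int) : List Int :=
  PySem.Set.diff (PySem.Set.union cycle1 cycle2) (PySem.Set.inter cycle1 cycle2)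

-- powerset(s): for i in range(1 << x): powa.append([s[j] for j in range(x) if (i & (1 << j))])
-- range(1 << x)/range(x) ported over Nat (their bounds are nonnegative); s[j] with 0 ≤ j < len s is s.getD j [] (exact)
def pvPowerset (s : List (List Int)) : List (List (List Int)) :=
  let x := s.length
  (List.range (1 <<< x)).foldl (fun powa i =>
    powa ++ [(List.range x).foldl (fun acc j =>
      if i &&& (1 <<< j) ≠ 0 then acc ++ [s.getD j []] else acc) []]) []

def winding_cycle_finder (vset : List Int) (eset : List Int) (cycle_set : List (List Int)) (w_cycle : List Int) : List (List Int) :=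
  -- partition loop: w_cycle[i] ported as pyGetD w_cycle i 0 — exact under Pre_ (i < len w_cycle); Python raises IndexError outside it
  let zo := (List.range cycle_set.length).foldl (fun (zo : List (List Int) × List (List Int)) i =>
    if PySem.List.pyGetD w_cycle (Int.ofNat i) 0 = 0 then (zo.1 ++ [cycle_set.getD i []], zo.2)
    else (zo.1, zo.2 ++ [cycle_set.getD i []])) ([], [])
  let powa_zero_w_cycle := pvPowerset zo.1
  zo.2.foldl (fun tot cycle =>
    powa_zero_w_cycle.foldl (fun tot cycle_set_p =>
      tot ++ [cycle_set_p.foldl (fun f_cycle cycle2 => pvMerger f_cycle cycle2) cycle]) tot) []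

-- ===== PORT B =====
def winding_cycle_finder_alt (vset : List Int) (eset : List Int) (cycle_set : List (List Int)) (w_cycle : List Int) : List (List Int) :=
  let pairs := cycle_set.zip w_cycle
  let zero := (pairs.filter (fun p => p.2 = 0)).map Prod.fst
  let ones := (pairs.filter (fun p => p.2 ≠ 0)).map Prod.fst
  ones.foldl (fun out c =>
    out ++ zero.foldl (fun res zc => res ++ res.map (fun f => PySem.Set.symmDiff f zc)) [c]) []

-- ===== PRECONDITION & SPEC =====
-- Pre_ excludes (a) w_cycle shorter than cycle_set, where A raises IndexError, and
-- (b) inner lists with duplicate elements, which encode no Python input: cycle_set holds Python SETS (distinct elements).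
def Pre_winding_cycle_finder (vset : List Int) (eset : List Int) (cycle_set : List (List Int)) (w_cycle : List Int) : Prop :=
  cycle_set.length ≤ w_cycle.length ∧ ∀ c ∈ cycle_set, c.Nodup
instance (vset : List Int) (eset : List Int) (cycle_set : List (List Int)) (w_cycle : List Int) : Decidable (Pre_winding_cycle_finder vset eset cycle_set w_cycle) := by unfold Pre_winding_cycle_finder; infer_instance

def pvWitness_winding_cycle_finder : List Int × List Int × List (List Int) × List Int :=
  ([], [], [[1, 2], [2, 3], [1, 3]], [1, 0, 0])

def Spec_winding_cycle_finder (vset : List Int) (eset : List Int) (cycle_set : List (List Int)) (w_cycle : List Int) (out : List (List Int)) : Prop := out = winding_cycle_finder_alt vset eset cycle_set w_cycle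
instance (vset : List Int) (eset : List Int) (cycle_set : List (List Int)) (w_cycle : List Int) (out : List (List Int)) : Decidable (Spec_winding_cycle_finder vset eset cycle_set w_cycle out) := by unfold Spec_winding_cycle_finder; infer_instance

-- ===== CLAIM (what is proved, stated in full; the proofs are below) =====
def Claim_equal_winding_cycle_finder : Prop := ∀ (vset : List Int) (eset : List Int) (cycle_set : List (List Int)) (w_cycle : List Int), Dom_winding_cycle_finder vset eset cycle_set w_cycle → Pre_winding_cycle_finder vset eset cycle_set w_cycle → Spec_winding_cycle_finder vset eset cycle_set w_cycle (winding_cycle_finder vset eset cycle_set w_cycle)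
-- ===== LEMMAS AND PROOFS =====

-- the powerset in head-recursive form: the subsets of (a :: t) in mask order are, for each subset S of t, S then a :: S
def pvPW (s : List (List Int)) : List (List (List Int)) :=
  match s with
  | [] => [[]]
  | a :: t => (pvPW t).flatMap (fun S => [S, a :: S])

-- one entry of A's powerset, in map/filter form
def pvEntry (s : List (List Int)) (i : Nat) : List (List Int) :=
  ((List.range s.length).filter (fun j => decide (i &&& (1 <<< j) ≠ 0))).map (fun j => s.getD j [])

theorem pv_foldl_append_ite {α β : Type} (l : List α) (P : α → Prop) [DecidablePred P] (f : α → β) (acc : List β) :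
    l.foldl (fun acc j => if P j then acc ++ [f j] else acc) acc
      = acc ++ (l.filter (fun j => decide (P j))).map f := by
  induction l generalizing acc with
  | nil => simp
  | cons x xs ih =>
    by_cases h : P x <;> simp [h, ih, List.append_assoc]

theorem pv_range_two_mul (n : Nat) :
    List.range (2 * n) = (List.range n).flatMap (fun q => [2 * q, 2 * q + 1]) := by
  induction n with
  | zero => simp
  | succ n ih =>
    rw [Nat.mul_succ, List.range_add, ih]
    simp [List.range_succ]

theorem pv_entry_cons (a : List Int) (t : List (List Int)) (i : Nat) :
    pvEntry (a :: t) i = (if i % 2 = 1 then [a] else []) ++ pvEntry t (i / 2) := by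
  unfold pvEntry
  rw [show (a :: t).length = t.length + 1 from rfl, List.range_succ_eq_map]
  rw [List.filter_cons, List.filter_map]
  have h0 : (decide (i &&& (1 <<< 0) ≠ 0)) = decide (i % 2 = 1) := by
    simp [Nat.and_two_pow, Nat.testBit_zero]
  have hb : ((fun j => decide (i &&& (1 <<< j) ≠ 0)) ∘ Nat.succ)
      = (fun j => decide ((i / 2) &&& (1 <<< j) ≠ 0)) := by
    funext j
    simp only [Function.comp_apply]
    simp [Nat.one_shiftLeft, Nat.and_two_pow]
    exact Nat.testBit_add_one i j
  rw [h0, hb]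
  by_cases h : i % 2 = 1 <;>
    simp [h, List.map_map, Function.comp_def]

theorem pv_powerset_map (s : List (List Int)) :
    pvPowerset s = (List.range (1 <<< s.length)).map (pvEntry s) := by
  unfold pvPowerset pvEntry
  simp only [pv_foldl_append_ite, List.nil_append]
  rw [PySem.List.foldl_append_singleton_eq_map]
  simp

theorem pv_powerset_eq_pw (s : List (List Int)) : pvPowerset s = pvPW s := by
  rw [pv_powerset_map]
  induction s with
  | nil => decide
  | cons a t ih =>
    have h2 : (1 <<< ((a :: t).length)) = 2 * (1 <<< t.length) := by
      simp [Nat.shiftLeft_eq, List.length_cons, pow_succ]; ring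
    rw [h2, pv_range_two_mul]
    rw [List.map_flatMap]
    have he : ∀ q : Nat, (List.map (pvEntry (a :: t)) [2 * q, 2 * q + 1])
        = [pvEntry t q, a :: pvEntry t q] := by
      intro q
      have e1 : pvEntry (a :: t) (2 * q) = pvEntry t q := by
        rw [pv_entry_cons]
        have hq : ¬ (2 * q) % 2 = 1 := by omega
        simp [hq, Nat.mul_div_cancel_left]
      have e2 : pvEntry (a :: t) (2 * q + 1) = a :: pvEntry t q := by
        rw [pv_entry_cons]
        have hq1 : (2 * q + 1) % 2 = 1 := by omega
        have hq2 : (2 * q + 1) / 2 = q := by omega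
        simp [hq1, hq2]
      simp [e1, e2]
    simp only [he]
    rw [show pvPW (a :: t) = (pvPW t).flatMap (fun S => [S, a :: S]) from rfl, ← ih]
    simp [List.flatMap_map]

theorem pv_mem_pw {s : List (List Int)} {S : List (List Int)} (h : S ∈ pvPW s) :
    ∀ x ∈ S, x ∈ s := by
  induction s generalizing S with
  | nil => simp [pvPW] at h; simp [h]
  | cons a t ih =>
    simp only [pvPW, List.mem_flatMap] at h
    obtain ⟨T, hT, hS⟩ := h
    simp only [List.mem_cons, List.not_mem_nil, or_false] at hS
    rcases hS with rfl | rfl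
    · intro x hx; exact List.mem_cons_of_mem _ (ih hT x hx)
    · intro x hx
      rcases List.mem_cons.mp hx with rfl | hx
      · exact List.mem_cons_self
      · exact List.mem_cons_of_mem _ (ih hT x hx)

theorem pv_merger_eq_symmDiff (a b : List Int) (hb : b.Nodup) :
    pvMerger a b = PySem.Set.symmDiff a b := by
  unfold pvMerger
  rw [PySem.Set.union, PySem.Set.update_eq_append_filter, PySem.Set.ofList_eq_self_of_nodup _ hb]
  unfold PySem.Set.symmDiff PySem.Set.diff
  rw [List.filter_append]
  congr 1
  · apply List.filter_congr; intro x hx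
    simp [PySem.Set.inter, PySem.Set.contains, List.mem_filter, hx]
  · rw [List.filter_filter]
    apply List.filter_congr; intro x hx
    by_cases h : x ∈ a <;> simp [PySem.Set.inter, PySem.Set.contains, List.mem_filter, h]

-- B's doubling fold computes, for each subset S of zs in mask order, the left-fold of symmDiff over S
theorem pv_doubling (zs : List (List Int)) (rs : List (List Int)) :
    zs.foldl (fun res zc => res ++ res.map (fun f => PySem.Set.symmDiff f zc)) rs =
    (pvPW zs).flatMap (fun S => rs.map (fun r => S.foldl (fun f c => PySem.Set.symmDiff f c) r)) := by
  induction zs generalizing rs with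
  | nil => simp [pvPW]
  | cons a t ih =>
    rw [List.foldl_cons, ih]
    rw [show pvPW (a :: t) = (pvPW t).flatMap (fun S => [S, a :: S]) from rfl]
    rw [List.flatMap_assoc]
    congr 1
    funext S
    simp [List.map_append, List.map_map, Function.comp_def]

-- A's index-driven partition loop agrees with B's zip-filters
theorem pv_partition_aux (cs : List (List Int)) (w : List Int) (h : cs.length ≤ w.length)
    (n : Nat) (hn : n ≤ cs.length) :
    (List.range n).foldl (fun (zo : List (List Int) × List (List Int)) i =>
      if PySem.List.pyGetD w (Int.ofNat i) 0 = 0 then (zo.1 ++ [cs.getD i []], zo.2)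
      else (zo.1, zo.2 ++ [cs.getD i []])) ([], []) =
    ((((cs.zip w).take n).filter (fun p => p.2 = 0)).map Prod.fst,
     (((cs.zip w).take n).filter (fun p => p.2 ≠ 0)).map Prod.fst) := by
  induction n with
  | zero => simp
  | succ n ih =>
    have hlt : n < cs.length := by omega
    have hltw : n < w.length := by omega
    have hzl : n < (cs.zip w).length := by simp [List.length_zip]; omega
    rw [List.range_succ, List.foldl_append, ih (by omega)]
    have htake : (cs.zip w).take (n+1) = (cs.zip w).take n ++ [(cs[n], w[n])] := by
      rw [List.take_add_one]
      simp [List.getElem?_eq_getElem hzl]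
    by_cases hw : w[n] = 0 <;>
      simp [htake, List.filter_append, hw, List.getElem?_eq_getElem hltw, List.getElem?_eq_getElem hlt]

-- ===== VERDICT (by name: the statement is the Claim_ definition above) =====
theorem winding_cycle_finder_spec : Claim_equal_winding_cycle_finder := by
  intro vset eset cs w _ hpre
  obtain ⟨hlen, hnd⟩ := hpre
  unfold Spec_winding_cycle_finder winding_cycle_finder winding_cycle_finder_alt
  have hz : (cs.zip w).take cs.length = cs.zip w := by
    exact List.take_of_length_le (by rw [List.length_zip]; omega)
  rw [pv_partition_aux cs w hlen cs.length le_rfl, hz]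
  set zero := ((cs.zip w).filter (fun p => p.2 = 0)).map Prod.fst with hzero
  set ones := ((cs.zip w).filter (fun p => p.2 ≠ 0)).map Prod.fst with hones
  have hzc : ∀ x ∈ zero, x ∈ cs := by
    intro x hx
    rw [hzero] at hx
    simp only [List.mem_map, List.mem_filter] at hx
    obtain ⟨p, ⟨hp, _⟩, rfl⟩ := hx
    exact (List.of_mem_zip hp).1
  -- reduce both sides to flatMap over the one-cycles
  simp only [PySem.List.foldl_append_singleton_eq_map, PySem.List.foldl_append_eq_flatMap,
    List.nil_append]
  apply List.flatMap_congr
  intro c _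
  rw [pv_doubling, pv_powerset_eq_pw]
  simp only [List.map_cons, List.map_nil]
  rw [show ∀ (l : List (List (List Int))) (g : List (List Int) → List Int),
        l.flatMap (fun S => [g S]) = l.map g from fun l g => (List.map_eq_flatMap).symm]
  apply List.map_congr_left
  intro S hS
  apply PySem.List.foldl_congr_mem'
  intro x hx acc
  exact pv_merger_eq_symmDiff acc x (hnd x (hzc x (pv_mem_pw hS x hx)))
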